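-- pv_equiv track=rewrite | github.com/ranfysvalle02/mdb-runtime | mdb_engine/auth/shared_users.py | user_has_role
-- ===== SOURCE A (Python) =====
-- from typing import TYPE_CHECKING, Any
--
-- def user_has_role(
--     user: dict[str, Any],
--     app_slug: str,
--     required_role: str,
--     role_hierarchy: dict[str, list[str]] | None = None,
-- ) -> bool:
--     """
--     Check if user has a required role for an app.
--
--     Args:
--         user: User dict (from validate_token or get_user_by_email)
--         app_slug: App slug to check
--         required_role: Role to check for
--         role_hierarchy: Optional dict mapping roles to their inherited roles
--                        e.g., {"admin": ["editor", "viewer"], "editor": ["viewer"]}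
--
--     Returns:
--         True if user has the required role (directly or via hierarchy)
--     """
--     app_roles = user.get("app_roles", {}).get(app_slug, [])
--
--     # Direct role check
--     if required_role in app_roles:
--         return True
--
--     # Check via hierarchy
--     if role_hierarchy:
--         for user_role in app_roles:
--             inherited_roles = role_hierarchy.get(user_role, [])
--             if required_role in inherited_roles:
--                 return True
--
--     return False
-- ===== SOURCE B (Python) =====
-- def user_has_role(user, app_slug, required_role, role_hierarchy=None):
--     """Inverted traversal: instead of looping over the user's roles and doing a
--     dict lookup per role, scan the hierarchy's entries once and ask whether some
--     entry grants required_role from a role the user holds."""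
--     app_roles = user.get("app_roles", {}).get(app_slug, [])
--     return required_role in app_roles or any(
--         required_role in inherited and parent in app_roles
--         for parent, inherited in (role_hierarchy or {}).items()
--     )
-- ===== Notes on version B (the rewrite author's own statement) =====
-- stated objective: simpler
-- what changed: A iterates over the user's roles performing a hierarchy-dict lookup per role with early returns; B inverts the traversal: one scan over the hierarchy's entries (parent, inherited), testing 'required_role in inherited and parent in app_roles', with no per-role dict lookup and no loop over app_roles, collapsed into a single boolean expression.
import Mathlib
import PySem

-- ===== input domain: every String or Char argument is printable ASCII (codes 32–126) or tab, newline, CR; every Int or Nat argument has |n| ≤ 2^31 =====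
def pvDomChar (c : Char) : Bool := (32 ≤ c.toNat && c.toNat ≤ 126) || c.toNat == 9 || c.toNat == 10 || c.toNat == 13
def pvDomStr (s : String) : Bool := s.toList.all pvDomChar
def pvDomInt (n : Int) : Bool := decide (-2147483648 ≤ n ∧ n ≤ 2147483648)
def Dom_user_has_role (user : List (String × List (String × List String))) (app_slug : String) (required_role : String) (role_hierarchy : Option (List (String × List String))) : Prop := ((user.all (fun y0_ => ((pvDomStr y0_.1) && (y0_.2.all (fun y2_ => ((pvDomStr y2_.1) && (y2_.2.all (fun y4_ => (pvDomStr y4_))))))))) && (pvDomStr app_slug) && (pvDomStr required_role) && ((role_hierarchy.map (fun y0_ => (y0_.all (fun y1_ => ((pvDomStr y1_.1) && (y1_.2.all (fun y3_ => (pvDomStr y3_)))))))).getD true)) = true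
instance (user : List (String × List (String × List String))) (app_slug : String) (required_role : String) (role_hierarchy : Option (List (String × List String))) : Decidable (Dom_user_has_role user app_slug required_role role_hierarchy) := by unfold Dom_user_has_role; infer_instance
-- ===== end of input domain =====

-- B inverts the traversal: one scan over the hierarchy's entries instead of a dict lookup per
-- user role; objective: simpler (return-value equivalence).
-- ===== PORT A =====
def uhrLoopA (h : List (String × List String)) (required_role : String) : List String → Bool
  | [] => false
  | r :: rest =>
      if (PySem.Dict.getD (PySem.Dict.mk h) r []).contains required_role then true
      else uhrLoopA h required_role rest

def user_has_role (user : List (String × List (String × List String))) (app_slug : String) (required_role : String) (role_hierarchy : Option (List (String × List String))) : Bool :=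
  let app_roles := PySem.Dict.getD (PySem.Dict.mk (PySem.Dict.getD (PySem.Dict.mk user) "app_roles" [])) app_slug []
  if app_roles.contains required_role then true
  else
    match role_hierarchy with
    | none => false
    | some h => if h.isEmpty then false else uhrLoopA h required_role app_roles

-- ===== PORT B =====
def user_has_role_alt (user : List (String × List (String × List String))) (app_slug : String) (required_role : String) (role_hierarchy : Option (List (String × List String))) : Bool :=
  let app_roles := PySem.Dict.getD (PySem.Dict.mk (PySem.Dict.getD (PySem.Dict.mk user) "app_roles" [])) app_slug []
  app_roles.contains required_role ||
    (role_hierarchy.getD []).any (fun p => p.2.contains required_role && app_roles.contains p.1)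

-- ===== PRECONDITION & SPEC =====
-- Pre_ excludes only association lists for role_hierarchy with duplicate keys: these do not
-- represent any Python dict (dict keys are unique), so no Python input is excluded.
def Pre_user_has_role (user : List (String × List (String × List String))) (app_slug : String) (required_role : String) (role_hierarchy : Option (List (String × List String))) : Prop :=
  ((role_hierarchy.getD []).map Prod.fst).Nodup
instance (user : List (String × List (String × List String))) (app_slug : String) (required_role : String) (role_hierarchy : Option (List (String × List String))) : Decidable (Pre_user_has_role user app_slug required_role role_hierarchy) := by unfold Pre_user_has_role; infer_instance

def pvWitness_user_has_role : (List (String × List (String × List String))) × String × String × (Option (List (String × List String))) :=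
  ([("app_roles", [("app", ["editor"])])], "app", "viewer", some [("editor", ["viewer"])])

def Spec_user_has_role (user : List (String × List (String × List String))) (app_slug : String) (required_role : String) (role_hierarchy : Option (List (String × List String))) (out : Bool) : Prop := out = user_has_role_alt user app_slug required_role role_hierarchy
instance (user : List (String × List (String × List String))) (app_slug : String) (required_role : String) (role_hierarchy : Option (List (String × List String))) (out : Bool) : Decidable (Spec_user_has_role user app_slug required_role role_hierarchy out) := by unfold Spec_user_has_role; infer_instance

-- ===== CLAIM (what is proved, stated in full; the proofs are below) =====
def Claim_equal_user_has_role : Prop := ∀ (user : List (String × List (String × List String))) (app_slug : String) (required_role : String) (role_hierarchy : Option (List (String × List String))), Dom_user_has_role user app_slug required_role role_hierarchy → Pre_user_has_role user app_slug required_role role_hierarchy → Spec_user_has_role user app_slug required_role role_hierarchy (user_has_role user app_slug required_role role_hierarchy)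

-- ===== LEMMAS AND PROOFS =====

-- A's early-return loop succeeds iff some held role's hierarchy lookup contains the required role
theorem uhrLoopA_eq_true_iff (h : List (String × List String)) (rr : String) :
    ∀ (l : List String),
      (uhrLoopA h rr l = true ↔ ∃ r ∈ l, rr ∈ PySem.Dict.getD (PySem.Dict.mk h) r []) := by
  intro l
  induction l with
  | nil => simp [uhrLoopA]
  | cons r rest ih =>
      by_cases hc : rr ∈ PySem.Dict.getD (PySem.Dict.mk h) r []
      · simp only [uhrLoopA, List.contains_iff_mem, if_pos hc, true_iff]
        exact ⟨r, List.mem_cons_self, hc⟩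
      · simp only [uhrLoopA, List.contains_iff_mem, if_neg hc, ih, List.mem_cons]
        constructor
        · rintro ⟨r', hr', hy⟩; exact ⟨r', Or.inr hr', hy⟩
        · rintro ⟨r', (rfl | hr'), hy⟩
          · exact absurd hy hc
          · exact ⟨r', hr', hy⟩

-- with unique hierarchy keys, the per-role first-match lookup view and the scan-the-entries view coincide
theorem lookup_view_iff_scan_view (h : List (String × List String)) (rr : String)
    (roles : List String) (hnd : (h.map Prod.fst).Nodup) :
    ((∃ r ∈ roles, rr ∈ PySem.Dict.getD (PySem.Dict.mk h) r []) ↔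
      ∃ p ∈ h, rr ∈ p.2 ∧ p.1 ∈ roles) := by
  have hk : (PySem.Dict.mk h).keys.Nodup := hnd
  constructor
  · rintro ⟨r, hr, hy⟩
    rcases hg : (PySem.Dict.mk h).get? r with _ | v
    · rw [PySem.Dict.getD_eq_get?_getD, hg] at hy
      simp at hy
    · have hv : PySem.Dict.getD (PySem.Dict.mk h) r [] = v := by
        rw [PySem.Dict.getD_eq_get?_getD, hg]; rfl
      have hmem : (r, v) ∈ (PySem.Dict.mk h).items := PySem.Dict.mem_items_of_get?_eq_some _ hg
      exact ⟨(r, v), hmem, hv ▸ hy, hr⟩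
  · rintro ⟨⟨k, v⟩, hp, hy, hr⟩
    exact ⟨k, hr, (PySem.Dict.getD_of_mem_items _ hp hk []) ▸ hy⟩

-- ===== VERDICT (by name: the statement is the Claim_ definition above) =====
theorem user_has_role_spec : Claim_equal_user_has_role := by
  intro user app_slug rr rh _ hpre
  unfold Spec_user_has_role user_has_role user_has_role_alt
  rw [Bool.eq_iff_iff]
  set app_roles := PySem.Dict.getD (PySem.Dict.mk (PySem.Dict.getD (PySem.Dict.mk user) "app_roles" [])) app_slug [] with har
  cases rh with
  | none => by_cases hd : rr ∈ app_roles <;> simp [hd]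
  | some h =>
      have hnd : (h.map Prod.fst).Nodup := hpre
      by_cases hd : rr ∈ app_roles
      · simp [hd]
      · by_cases he : h.isEmpty
        · rw [List.isEmpty_iff] at he
          subst he
          simp [hd]
        · simp only [List.contains_iff_mem, if_neg hd, he, Bool.false_eq_true, if_false,
            Option.getD_some, uhrLoopA_eq_true_iff, List.any_eq_true, Bool.and_eq_true,
            Bool.or_eq_true]
          rw [lookup_view_iff_scan_view h rr app_roles hnd]
          constructor
          · rintro ⟨p, hp, h1, h2⟩; exact Or.inr ⟨p, hp, h1, h2⟩
          · rintro (hx | ⟨p, hp, h1, h2⟩)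
            · exact absurd hx hd
            · exact ⟨p, hp, h1, h2⟩
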